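-- pv_equiv track=rewrite | github.com/chichann/jav_study | jav_study/common.py | set_true_code
-- ===== SOURCE A (Python) =====
-- def set_true_code(code):
--     code_list = code.split('-')
--     code = ''.join(code_list).replace('\r', '').replace('\n', '').replace(' ', '')
--     length = len(code)
--     index = length - 1
--     num = ''
--     all_number = '0123456789'
--     while index > -1:
--         s = code[index]
--         if s not in all_number:
--             break
--         num = s + num
--         index -= 1
--     prefix = code[0:index + 1]
--     return (prefix + '-' + num).upper()
-- ===== SOURCE B (Python) =====
-- def set_true_code(code):
--     cleaned = ''.join(code.split('-')).replace('\r', '').replace('\n', '').replace(' ', '')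
--     prefix = cleaned.rstrip('0123456789')
--     num = cleaned[len(prefix):]
--     return (prefix + '-' + num).upper()
-- ===== Notes on version B (the rewrite author's own statement) =====
-- stated objective: simpler
-- what changed: Replaces A's explicit backward index loop (char-by-char scan with string prepends and a slice up to the stop index) by a single rstrip('0123456789') to get the prefix and one slice to recover the trailing number.
import Mathlib
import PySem

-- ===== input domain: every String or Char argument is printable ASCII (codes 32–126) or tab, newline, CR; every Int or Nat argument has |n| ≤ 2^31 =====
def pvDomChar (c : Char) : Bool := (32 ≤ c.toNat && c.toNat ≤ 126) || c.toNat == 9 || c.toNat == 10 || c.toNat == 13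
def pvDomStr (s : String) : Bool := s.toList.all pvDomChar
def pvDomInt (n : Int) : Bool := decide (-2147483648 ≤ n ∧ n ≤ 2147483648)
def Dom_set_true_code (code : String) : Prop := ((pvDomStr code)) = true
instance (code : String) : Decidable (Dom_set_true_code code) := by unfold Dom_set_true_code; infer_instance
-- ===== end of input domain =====

-- B replaces A's backward index loop with prefix = cleaned.rstrip('0123456789') plus one slice: simpler, same result.


-- ===== PORT A =====
-- all_number = '0123456789'
def pvDigits : List Char := ['0','1','2','3','4','5','6','7','8','9']

-- code = ''.join(code.split('-')).replace('\r','').replace('\n','').replace(' ','')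
-- (identical cleaning line in A and B, so shared)
def pvClean (code : String) : List Char :=
  PySem.Chars.replace
    (PySem.Chars.replace
      (PySem.Chars.replace (PySem.Chars.join [] (PySem.Chars.splitOn code.toList ['-'])) ['\r'] [])
      ['\n'] [])
    [' '] []

-- the backward while-loop; n = index + 1 (loop runs while index > -1);
-- 's in all_number' for the single char s is char membership, ported as contains
def stcLoop (cs : List Char) : Nat → List Char → Nat × List Char
  | 0, num => (0, num)
  | n+1, num =>
    let s := PySem.List.pyGetD cs (n : Int) ' '   -- code[index], always in range here
    if pvDigits.contains s then stcLoop cs n (s :: num) else (n+1, num)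

def set_true_code (code : String) : String :=
  let cs := pvClean code
  let r := stcLoop cs cs.length []                 -- (index+1, num) after the loop
  let pre := PySem.List.slice cs (some 0) (some (r.1 : Int))   -- code[0:index+1]
  String.ofList (PySem.Chars.upper (pre ++ '-' :: r.2))            -- (prefix+'-'+num).upper()

-- ===== PORT B =====
def set_true_code_alt (code : String) : String :=
  let cs := pvClean code
  -- cleaned.rstrip('0123456789'): drop trailing chars of that set (exact hand port)
  let pre := (cs.reverse.dropWhile (fun c => pvDigits.contains c)).reverse
  let num := PySem.List.slice cs (some (pre.length : Int)) none  -- cleaned[len(prefix):]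
  String.ofList (PySem.Chars.upper (pre ++ '-' :: num))

-- ===== PRECONDITION & SPEC =====
def Spec_set_true_code (code : String) (out : String) : Prop := out = set_true_code_alt code
instance (code : String) (out : String) : Decidable (Spec_set_true_code code out) := by unfold Spec_set_true_code; infer_instance

-- ===== CLAIM (what is proved, stated in full; the proofs are below) =====
def Claim_equal_set_true_code : Prop := ∀ (code : String), Dom_set_true_code code → Spec_set_true_code code (set_true_code code)

-- ===== LEMMAS AND PROOFS =====
lemma stcLoop_eq (cs : List Char) : ∀ (n : Nat), n ≤ cs.length → ∀ (num : List Char),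
    stcLoop cs n num =
      (n - ((cs.take n).reverse.takeWhile (fun c => pvDigits.contains c)).length,
       ((cs.take n).reverse.takeWhile (fun c => pvDigits.contains c)).reverse ++ num) := by
  intro n
  induction n with
  | zero => intro _ num; simp [stcLoop]
  | succ n ih =>
    intro hle num
    have hn : n < cs.length := by omega
    have hget : PySem.List.pyGetD cs (n : Int) ' ' = cs[n] := by
      simp [PySem.List.pyGetD_natCast, List.getD_eq_getElem?_getD, List.getElem?_eq_getElem hn]
    have htake : (cs.take (n+1)).reverse = cs[n] :: (cs.take n).reverse := by
      rw [List.take_add_one, List.getElem?_eq_getElem hn]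
      simp
    rw [stcLoop, hget, htake]
    by_cases hd : pvDigits.contains cs[n]
    · rw [if_pos hd, ih (by omega) (cs[n] :: num)]
      rw [List.takeWhile_cons_of_pos (by simpa using hd)]
      simp
    · rw [if_neg hd]
      rw [List.takeWhile_cons_of_neg (by simpa using hd)]
      simp

lemma stc_list_eq (cs : List Char) :
    PySem.List.slice cs (some 0) (some (((stcLoop cs cs.length []).1 : Int)))
      ++ '-' :: (stcLoop cs cs.length []).2
    = (cs.reverse.dropWhile (fun c => pvDigits.contains c)).reverse
      ++ '-' :: PySem.List.slice cs
          (some (((cs.reverse.dropWhile (fun c => pvDigits.contains c)).reverse.length : Int))) none := by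
  set p := fun c => pvDigits.contains c with hp
  set t := cs.reverse.takeWhile p with ht
  set d := cs.reverse.dropWhile p with hd
  have hsplit : cs = d.reverse ++ t.reverse := by
    have : t ++ d = cs.reverse := by rw [ht, hd]; exact List.takeWhile_append_dropWhile
    calc cs = cs.reverse.reverse := (List.reverse_reverse cs).symm
      _ = (t ++ d).reverse := by rw [this]
      _ = d.reverse ++ t.reverse := by simp
  have htlen : t.length ≤ cs.length := by
    have := (List.takeWhile_prefix (l := cs.reverse) p).length_le
    simpa [ht] using this
  rw [stcLoop_eq cs cs.length le_rfl []]
  simp only [List.take_length, List.append_nil]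
  have hdlen : cs.length - t.length = d.reverse.length := by
    have : cs.length = d.reverse.length + t.reverse.length := by
      rw [hsplit]; simp
    simp at this ⊢; omega
  rw [PySem.List.slice_zero_start, PySem.List.slice_to_natCast, PySem.List.slice_from_natCast]
  rw [hdlen]
  congr 1
  · -- take d.reverse.length cs = d.reverse
    conv_lhs => rw [hsplit]
    exact List.take_left ..
  · congr 1
    -- t.reverse = drop d.reverse.length cs
    rw [← ht]
    conv_rhs => rw [hsplit]
    exact (List.drop_left ..).symm

-- ===== VERDICT (by name: the statement is the Claim_ definition above) =====
theorem set_true_code_spec : Claim_equal_set_true_code := by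
  intro code _
  unfold Spec_set_true_code set_true_code set_true_code_alt
  simp only []
  rw [stc_list_eq]
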